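-- pv_equiv track=rewrite | github.com/AlexSobUcka/python_code | testProject/past/tt5.py | count_normal_segments
-- ===== SOURCE A (Python) =====
-- def count_normal_segments(changes):
--     count_normal = 0
--     for i in range(len(changes)):
--         sum_i = sum(changes[:i + 1])
--         if sum_i == 0:
--             count_normal += len(changes) - i
--             break
--     return count_normal
-- ===== SOURCE B (Python) =====
-- def count_normal_segments(changes):
--     s = 0
--     for i, x in enumerate(changes):
--         s += x
--         if s == 0:
--             return len(changes) - i
--     return 0
-- ===== Notes on version B (the rewrite author's own statement) =====
-- stated objective: faster
-- what changed: B keeps a single running prefix sum in one pass instead of recomputing sum(changes[:i+1]) from scratch at every index, and returns directly at the first zero prefix sum.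
import Mathlib
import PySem

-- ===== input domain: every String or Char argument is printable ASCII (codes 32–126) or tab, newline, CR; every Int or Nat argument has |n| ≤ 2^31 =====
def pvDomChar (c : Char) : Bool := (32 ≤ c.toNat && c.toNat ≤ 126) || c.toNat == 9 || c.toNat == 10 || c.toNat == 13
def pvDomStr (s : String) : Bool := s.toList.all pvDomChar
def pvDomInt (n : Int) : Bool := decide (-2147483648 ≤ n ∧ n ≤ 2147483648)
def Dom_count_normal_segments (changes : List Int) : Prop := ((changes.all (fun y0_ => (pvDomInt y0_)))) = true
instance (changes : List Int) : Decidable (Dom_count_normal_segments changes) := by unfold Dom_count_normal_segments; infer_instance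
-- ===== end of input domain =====

-- B replaces A's per-index recomputation of sum(changes[:i+1]) by one running prefix sum (one pass); objective: faster.

-- ===== PORT A =====
-- A's for-loop over range(len(changes)) with break, step for step.
def pvALoop (changes : List Int) : List Nat → Int
  | [] => 0
  | i :: rest =>
      if (PySem.List.slice changes none (some ((i : Int) + 1))).sum = 0 then
        (changes.length : Int) - (i : Int)
      else pvALoop changes rest

def count_normal_segments (changes : List Int) : Int :=
  pvALoop changes (List.range changes.length)

-- ===== PORT B =====
-- B's single pass with running sum s and index i.
def pvBLoop (n : Nat) : List Int → Int → Nat → Int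
  | [], _, _ => 0
  | x :: xs, s, i =>
      if s + x = 0 then (n : Int) - (i : Int) else pvBLoop n xs (s + x) (i + 1)

def count_normal_segments_alt (changes : List Int) : Int :=
  pvBLoop changes.length changes 0 0

-- ===== PRECONDITION & SPEC =====
def Spec_count_normal_segments (changes : List Int) (out : Int) : Prop := out = count_normal_segments_alt changes
instance (changes : List Int) (out : Int) : Decidable (Spec_count_normal_segments changes out) := by unfold Spec_count_normal_segments; infer_instance

-- ===== CLAIM (what is proved, stated in full; the proofs are below) =====
def Claim_equal_count_normal_segments : Prop := ∀ (changes : List Int), Dom_count_normal_segments changes → Spec_count_normal_segments changes (count_normal_segments changes)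

-- ===== LEMMAS AND PROOFS =====

theorem pvLoop_eq (suf : List Int) : ∀ (pre : List Int),
    pvALoop (pre ++ suf) (List.range' pre.length suf.length 1)
      = pvBLoop (pre ++ suf).length suf pre.sum pre.length := by
  induction suf with
  | nil => intro pre; simp [pvALoop, pvBLoop]
  | cons x xs ih =>
      intro pre
      rw [List.length_cons, List.range'_succ]
      show (if (PySem.List.slice (pre ++ x :: xs) none (some ((pre.length : Int) + 1))).sum = 0
            then _ else pvALoop (pre ++ x :: xs) (List.range' (pre.length + 1) xs.length 1))
           = pvBLoop (pre ++ x :: xs).length (x :: xs) pre.sum pre.length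
      have hslice : PySem.List.slice (pre ++ x :: xs) none (some ((pre.length : Int) + 1))
          = pre ++ [x] := by
        have : ((pre.length : Int) + 1) = ((pre.length + 1 : Nat) : Int) := by push_cast; ring
        rw [this, PySem.List.slice_to_natCast]
        rw [show (x :: xs) = [x] ++ xs by rfl, ← List.append_assoc,
          show pre.length + 1 = (pre ++ [x]).length by simp,
          List.take_left]
      have hre : pre ++ x :: xs = (pre ++ [x]) ++ xs := by simp
      rw [hslice]
      simp only [List.sum_append, List.sum_cons, List.sum_nil, add_zero]
      by_cases h : pre.sum + x = 0
      · simp [h, pvBLoop]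
      · simp only [h, if_false]
        have := ih (pre ++ [x])
        simp only [List.length_append, List.length_cons, List.length_nil, List.sum_append,
          List.sum_cons, List.sum_nil, add_zero] at this
        rw [hre, this,
          show pvBLoop (pre ++ [x] ++ xs).length (x :: xs) pre.sum pre.length
              = if pre.sum + x = 0 then ((pre ++ [x] ++ xs).length : Int) - (pre.length : Int)
                else pvBLoop (pre ++ [x] ++ xs).length xs (pre.sum + x) (pre.length + 1) from rfl,
          if_neg h]
        have hn : pre.length + (0 + 1) + xs.length = (pre ++ [x] ++ xs).length := by simp; omega
        rw [hn]

-- ===== VERDICT (by name: the statement is the Claim_ definition above) =====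
theorem count_normal_segments_spec : Claim_equal_count_normal_segments := by
  intro changes _
  show count_normal_segments changes = count_normal_segments_alt changes
  have := pvLoop_eq changes []
  simpa [count_normal_segments, count_normal_segments_alt, List.range_eq_range'] using this
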